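-- pv_equiv track=rewrite | github.com/Bendemeurichy/scripting2022 | week4/geruchtenmolen.py | is_ketting
-- ===== SOURCE A (Python) =====
-- def spreekt_met(persoon, tabel):
--     letters = studentenletters(len(tabel))
--     return {letters[i] for i in range(len(tabel)) if tabel[letters.index(persoon)][i]}
--
-- def spreken_met_elkaar(student1, student2, tabel):
--     return student2 in spreekt_met(student1, tabel)
--
-- def is_ketting(mogketting, tabel):
--     letters = studentenletters(len(tabel))
--     for i in range(len(tabel) - 1):
--         if mogketting[i] not in letters or not spreken_met_elkaar(mogketting[i], mogketting[i + 1], tabel) \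
--                 or mogketting.count(letters[i]) != 1:
--             return False
--     if mogketting.count(letters[-1]) != 1:
--         return False
--     return True
--
-- def studentenletters(aantal):
--     return list(map(chr, range(65, 65 + aantal)))
-- ===== SOURCE B (Python) =====
-- def is_ketting(mogketting, tabel):
--     n = len(tabel)
--     counts = {}
--     for ch in mogketting:
--         counts[ch] = counts.get(ch, 0) + 1
--     for i in range(n):
--         if counts.get(chr(65 + i), 0) != 1:
--             return False
--     for i in range(n - 1):
--         a = ord(mogketting[i]) - 65
--         b = ord(mogketting[i + 1]) - 65
--         if not (0 <= a < n and 0 <= b < n and tabel[a][b]):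
--             return False
--     return True
-- ===== Notes on version B (the rewrite author's own statement) =====
-- stated objective: alternative
-- what changed: B replaces A's per-step rebuilding of the letter list, the letters.index scan, the spreekt_met set comprehension and the per-step full-string count by one character-count dict built in a single pass plus direct ord()-arithmetic bounds checks and adjacency table lookups.
import Mathlib
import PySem

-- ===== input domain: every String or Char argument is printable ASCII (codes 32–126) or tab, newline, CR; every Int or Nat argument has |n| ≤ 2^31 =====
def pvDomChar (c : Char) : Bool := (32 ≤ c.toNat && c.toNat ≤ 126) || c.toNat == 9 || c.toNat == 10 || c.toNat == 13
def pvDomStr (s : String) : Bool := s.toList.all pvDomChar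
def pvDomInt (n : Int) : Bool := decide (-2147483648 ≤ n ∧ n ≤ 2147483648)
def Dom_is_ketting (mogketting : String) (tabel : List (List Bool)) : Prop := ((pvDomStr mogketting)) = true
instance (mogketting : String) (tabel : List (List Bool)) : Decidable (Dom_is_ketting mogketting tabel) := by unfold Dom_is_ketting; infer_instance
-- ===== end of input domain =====

-- B replaces A's per-step letter-list scans, set construction and full-string counts by one
-- character-count dict plus direct ord()-arithmetic adjacency lookups (return value only).

-- ===== PORT A =====
def studentenletters (aantal : Nat) : List Char :=
  (List.range aantal).map (fun i => Char.ofNat (65 + i))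

def spreekt_met (persoon : Char) (tabel : List (List Bool)) : PySem.Set Char :=
  let letters := studentenletters tabel.length
  PySem.Set.ofList (((List.range tabel.length).filter
      (fun (i : Nat) => PySem.List.pyGetD (PySem.List.pyGetD tabel (((PySem.List.index? letters persoon).getD 0 : Nat) : Int) []) (↑i) false)).map
    (fun (i : Nat) => PySem.List.pyGetD letters (↑i) ' '))

def spreken_met_elkaar (student1 student2 : Char) (tabel : List (List Bool)) : Bool :=
  PySem.Set.contains (spreekt_met student1 tabel) student2

def is_ketting (mogketting : String) (tabel : List (List Bool)) : Bool :=
  let letters := studentenletters tabel.length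
  let m := mogketting.toList
  ((List.range (tabel.length - 1)).all (fun (i : Nat) =>
      letters.contains (PySem.List.pyGetD m (i : Int) ' ') &&
      spreken_met_elkaar (PySem.List.pyGetD m (i : Int) ' ') (PySem.List.pyGetD m ((i : Int) + 1) ' ') tabel &&
      (PySem.List.count m (PySem.List.pyGetD letters (i : Int) ' ') == 1))) &&
  (PySem.List.count m (PySem.List.pyGetD letters (-1) ' ') == 1)

-- ===== PORT B =====
def is_ketting_alt (mogketting : String) (tabel : List (List Bool)) : Bool :=
  let n := tabel.length
  let m := mogketting.toList
  let counts : PySem.Dict Char Int :=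
    m.foldl (fun d ch => d.insert ch (d.getD ch 0 + 1)) PySem.Dict.empty
  ((List.range n).all (fun i => counts.getD (Char.ofNat (65 + i)) 0 == 1)) &&
  ((List.range (n - 1)).all (fun (i : Nat) =>
      let a : Int := ((PySem.List.pyGetD m (i : Int) ' ').toNat : Int) - 65
      let b : Int := ((PySem.List.pyGetD m ((i : Int) + 1) ' ').toNat : Int) - 65
      decide (0 ≤ a) && decide (a < (n : Int)) && decide (0 ≤ b) && decide (b < (n : Int)) &&
      PySem.List.pyGetD (PySem.List.pyGetD tabel a []) b false))

-- ===== PRECONDITION & SPEC =====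
-- pvPass: A's loop step i passes (all three checks succeed without an out-of-range access).
def pvPass (m : List Char) (tabel : List (List Bool)) (i : Nat) : Bool :=
  let n := tabel.length
  let ci := m.getD i ' '
  let cj := m.getD (i+1) ' '
  decide (i + 1 < m.length) &&
  decide (65 ≤ ci.toNat ∧ ci.toNat < 65 + n) &&
  decide (65 ≤ cj.toNat ∧ cj.toNat < 65 + n) &&
  decide (n ≤ (tabel.getD (ci.toNat - 65) []).length) &&
  (tabel.getD (ci.toNat - 65) []).getD (cj.toNat - 65) false &&
  decide (m.count (Char.ofNat (65 + i)) = 1)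

-- pvRaise: A's loop step i raises an IndexError (chain index out of range, or a row
-- shorter than the table is fully scanned by the set comprehension).
def pvRaise (m : List Char) (tabel : List (List Bool)) (i : Nat) : Bool :=
  let n := tabel.length
  let ci := m.getD i ' '
  decide (m.length ≤ i) ||
  (decide (65 ≤ ci.toNat ∧ ci.toNat < 65 + n) &&
    (decide (m.length ≤ i + 1) || decide ((tabel.getD (ci.toNat - 65) []).length < n)))

-- Pre_ excludes exactly the inputs on which the Python A raises an IndexError: the empty
-- table (letters[-1]), and chains where the loop reaches an out-of-range chain index or a
-- too-short row before any check fails; on every input where A returns, Pre_ holds.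
def Pre_is_ketting (mogketting : String) (tabel : List (List Bool)) : Prop :=
  1 ≤ tabel.length ∧
  ∀ i, i < tabel.length - 1 →
    (∀ j, j < i → pvPass mogketting.toList tabel j = true) →
    pvRaise mogketting.toList tabel i = false
instance (mogketting : String) (tabel : List (List Bool)) : Decidable (Pre_is_ketting mogketting tabel) := by unfold Pre_is_ketting; infer_instance

def pvWitness_is_ketting : String × List (List Bool) :=
  ("AB", [[false, true], [true, false]])

def Spec_is_ketting (mogketting : String) (tabel : List (List Bool)) (out : Bool) : Prop := out = is_ketting_alt mogketting tabel
instance (mogketting : String) (tabel : List (List Bool)) (out : Bool) : Decidable (Spec_is_ketting mogketting tabel out) := by unfold Spec_is_ketting; infer_instance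

-- ===== CLAIM (what is proved, stated in full; the proofs are below) =====
def Claim_equal_is_ketting : Prop := ∀ (mogketting : String) (tabel : List (List Bool)), Dom_is_ketting mogketting tabel → Pre_is_ketting mogketting tabel → Spec_is_ketting mogketting tabel (is_ketting mogketting tabel)

-- ===== LEMMAS AND PROOFS =====

theorem pv_toNat_ofNat (k : Nat) (h : k.isValidChar) : (Char.ofNat k).toNat = k := by
  simp [Char.ofNat, h, Char.toNat, Char.ofNatAux]

theorem pv_ofNat_eq_dom_iff (k : Nat) (c : Char) (hc : pvDomChar c = true) :
    Char.ofNat k = c ↔ k = c.toNat := by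
  simp [pvDomChar] at hc
  constructor
  · intro h
    have ht := congrArg Char.toNat h
    by_cases hk : k.isValidChar
    · rwa [pv_toNat_ofNat k hk] at ht
    · exfalso
      have : (Char.ofNat k).toNat = 0 := by simp [Char.ofNat, hk, Char.toNat]
      rw [this] at ht; omega
  · rintro rfl; exact Char.ofNat_toNat c

theorem pv_letters_length (n : Nat) : (studentenletters n).length = n := by
  simp [studentenletters]

theorem pv_letters_getD (n i : Nat) (h : i < n) (d : Char) :
    PySem.List.pyGetD (studentenletters n) (i : Int) d = Char.ofNat (65 + i) := by
  rw [PySem.List.pyGetD_natCast]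
  rw [List.getD_eq_getElem?_getD]
  simp [studentenletters, h]

theorem pv_mem_letters (n : Nat) (c : Char) (hc : pvDomChar c = true) :
    c ∈ studentenletters n ↔ 65 ≤ c.toNat ∧ c.toNat < 65 + n := by
  simp only [studentenletters, List.mem_map, List.mem_range]
  constructor
  · rintro ⟨i, hi, hE⟩
    rw [pv_ofNat_eq_dom_iff _ _ hc] at hE
    omega
  · rintro ⟨h1, h2⟩
    exact ⟨c.toNat - 65, by omega, by rw [pv_ofNat_eq_dom_iff _ _ hc]; omega⟩

theorem pv_index_letters (n : Nat) (c : Char) (hc : pvDomChar c = true)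
    (h1 : 65 ≤ c.toNat) (h2 : c.toNat < 65 + n) :
    PySem.List.index? (studentenletters n) c = some (c.toNat - 65) := by
  rw [PySem.List.index?_eq_idxOf?, List.idxOf?_eq_some_iff]
  refine ⟨by simp [studentenletters]; omega, ?_, ?_⟩
  · simp only [studentenletters, List.getElem_map, List.getElem_range]
    rw [pv_ofNat_eq_dom_iff _ _ hc]; omega
  · intro j hj
    simp only [studentenletters, List.getElem_map, List.getElem_range]
    rw [pv_ofNat_eq_dom_iff _ _ hc]; omega

theorem pv_spreekt (tabel : List (List Bool)) (c1 c2 : Char)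
    (hc1 : pvDomChar c1 = true) (hc2 : pvDomChar c2 = true)
    (h1 : 65 ≤ c1.toNat) (h2 : c1.toNat < 65 + tabel.length) :
    spreken_met_elkaar c1 c2 tabel = true ↔
      65 ≤ c2.toNat ∧ c2.toNat < 65 + tabel.length ∧
      PySem.List.pyGetD (PySem.List.pyGetD tabel ((c1.toNat - 65 : Nat) : Int) [])
        ((c2.toNat - 65 : Nat) : Int) false = true := by
  simp only [spreken_met_elkaar, spreekt_met]
  rw [pv_index_letters tabel.length c1 hc1 h1 h2]
  simp only [PySem.Set.contains, List.contains_iff_mem, PySem.Set.mem_ofList,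
    List.mem_map, List.mem_filter, List.mem_range, Option.getD_some]
  constructor
  · rintro ⟨i, ⟨hi, hrow⟩, hEq⟩
    rw [pv_letters_getD _ _ hi] at hEq
    rw [pv_ofNat_eq_dom_iff _ _ hc2] at hEq
    refine ⟨by omega, by omega, ?_⟩
    have : c2.toNat - 65 = i := by omega
    rw [this]; exact hrow
  · rintro ⟨hb1, hb2, hrow⟩
    refine ⟨c2.toNat - 65, ⟨by omega, hrow⟩, ?_⟩
    rw [pv_letters_getD _ _ (by omega)]
    rw [pv_ofNat_eq_dom_iff _ _ hc2]; omega

def pvM (m : List Char) (n i : Nat) : Prop :=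
  65 ≤ (m.getD i ' ').toNat ∧ (m.getD i ' ').toNat < 65 + n

def pvT (m : List Char) (tabel : List (List Bool)) (i : Nat) : Prop :=
  PySem.List.pyGetD (PySem.List.pyGetD tabel ((((m.getD i ' ').toNat - 65 : Nat) : Int)) [])
    ((((m.getD (i+1) ' ').toNat - 65 : Nat) : Int)) false = true

def pvC (m : List Char) (i : Nat) : Prop := List.count (Char.ofNat (65 + i)) m = 1

theorem pv_dom_getD (m : List Char) (i : Nat)
    (hdom : ∀ c ∈ m, pvDomChar c = true) : pvDomChar (m.getD i ' ') = true := by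
  rcases Nat.lt_or_ge i m.length with h | h
  · rw [List.getD_eq_getElem m ' ' h]
    exact hdom _ (List.getElem_mem h)
  · rw [List.getD_eq_default _ _ h]
    decide

theorem pv_A_iff (mog : String) (tabel : List (List Bool))
    (hdom : ∀ c ∈ mog.toList, pvDomChar c = true)
    (hn : 1 ≤ tabel.length) :
    is_ketting mog tabel = true ↔
      ((∀ i < tabel.length - 1,
          pvM mog.toList tabel.length i ∧
          (pvM mog.toList tabel.length (i+1) ∧ pvT mog.toList tabel i) ∧
          pvC mog.toList i) ∧
        pvC mog.toList (tabel.length - 1)) := by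
  simp only [is_ketting, Bool.and_eq_true, List.all_eq_true, List.mem_range]
  have hlast : PySem.List.pyGetD (studentenletters tabel.length) (-1) ' '
      = Char.ofNat (65 + (tabel.length - 1)) := by
    rw [PySem.List.pyGetD_neg_ofNat _ 1 ' ' (by omega) (by rw [pv_letters_length]; omega)]
    simp only [studentenletters, List.getElem_map, List.getElem_range, List.length_map,
      List.length_range]
  rw [hlast]
  apply and_congr
  · apply forall_congr'
    intro i
    apply imp_congr_right
    intro hi
    have hdomi : pvDomChar (mog.toList.getD i ' ') = true := pv_dom_getD _ _ hdom
    have hdomi1 : pvDomChar (mog.toList.getD (i+1) ' ') = true := pv_dom_getD _ _ hdom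
    rw [PySem.List.pyGetD_natCast]
    have hstep : ((i : Int) + 1) = ((i + 1 : Nat) : Int) := by push_cast; ring
    rw [hstep, PySem.List.pyGetD_natCast]
    constructor
    · rintro ⟨⟨hcont, hspk⟩, hcnt⟩
      have hmem : mog.toList.getD i ' ' ∈ studentenletters tabel.length := by
        simpa using hcont
      rw [pv_mem_letters _ _ hdomi] at hmem
      rw [pv_spreekt tabel _ _ hdomi hdomi1 hmem.1 hmem.2] at hspk
      refine ⟨hmem, ⟨⟨hspk.1, hspk.2.1⟩, hspk.2.2⟩, ?_⟩
      rw [PySem.List.count_eq, pv_letters_getD _ _ (by omega)] at hcnt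
      simpa [pvC] using hcnt
    · rintro ⟨hM, ⟨hM1, hT⟩, hC⟩
      refine ⟨⟨?_, ?_⟩, ?_⟩
      · simp only [List.contains_iff_mem, pv_mem_letters _ _ hdomi]
        exact hM
      · rw [pv_spreekt tabel _ _ hdomi hdomi1 hM.1 hM.2]
        exact ⟨hM1.1, hM1.2, hT⟩
      · rw [PySem.List.count_eq, pv_letters_getD _ _ (by omega)]
        simpa [pvC] using hC
  · rw [PySem.List.count_eq]
    simp [pvC]

theorem pv_B_iff (mog : String) (tabel : List (List Bool)) :
    is_ketting_alt mog tabel = true ↔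
      ((∀ i < tabel.length, pvC mog.toList i) ∧
        ∀ i < tabel.length - 1,
          (0 ≤ ((mog.toList.getD i ' ').toNat : Int) - 65 ∧
            ((mog.toList.getD i ' ').toNat : Int) - 65 < (tabel.length : Int) ∧
            0 ≤ ((mog.toList.getD (i+1) ' ').toNat : Int) - 65 ∧
            ((mog.toList.getD (i+1) ' ').toNat : Int) - 65 < (tabel.length : Int)) ∧
          PySem.List.pyGetD
            (PySem.List.pyGetD tabel (((mog.toList.getD i ' ').toNat : Int) - 65) [])
            (((mog.toList.getD (i+1) ' ').toNat : Int) - 65) false = true) := by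
  simp only [is_ketting_alt, PySem.Dict.foldl_insert_getD_add_one_eq_counter,
    Bool.and_eq_true, List.all_eq_true, List.mem_range, PySem.Dict.getD_counter,
    decide_eq_true_iff, PySem.List.pyGetD_natCast]
  apply and_congr
  · apply forall_congr'
    intro i
    apply imp_congr_right
    intro hi
    simp [pvC]
  · apply forall_congr'
    intro i
    apply imp_congr_right
    intro hi
    have hstep : ((i : Int) + 1) = ((i + 1 : Nat) : Int) := by push_cast; ring
    rw [hstep, PySem.List.pyGetD_natCast]
    tauto

theorem pv_main (mog : String) (tabel : List (List Bool))
    (hdom : Dom_is_ketting mog tabel) (hn : 1 ≤ tabel.length) :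
    is_ketting mog tabel = is_ketting_alt mog tabel := by
  have hdom' : ∀ c ∈ mog.toList, pvDomChar c = true := by
    simpa [Dom_is_ketting, pvDomStr, List.all_eq_true] using hdom
  apply Bool.coe_iff_coe.mp
  rw [pv_A_iff mog tabel hdom' hn, pv_B_iff]
  constructor
  · rintro ⟨hloop, hlast⟩
    constructor
    · intro i hi
      by_cases h : i < tabel.length - 1
      · exact (hloop i h).2.2
      · have he : i = tabel.length - 1 := by omega
        rw [he]; exact hlast
    · intro i hi
      obtain ⟨hM, ⟨hM1, hT⟩, _⟩ := hloop i hi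
      obtain ⟨ha1, ha2⟩ := hM
      obtain ⟨hb1, hb2⟩ := hM1
      refine ⟨⟨by omega, by omega, by omega, by omega⟩, ?_⟩
      have e1 : ((((mog.toList.getD i ' ').toNat - 65 : Nat)) : Int)
          = ((mog.toList.getD i ' ').toNat : Int) - 65 := by omega
      have e2 : ((((mog.toList.getD (i+1) ' ').toNat - 65 : Nat)) : Int)
          = ((mog.toList.getD (i+1) ' ').toNat : Int) - 65 := by omega
      unfold pvT at hT
      rw [e1, e2] at hT
      exact hT
  · rintro ⟨hcnt, hedge⟩
    constructor
    · intro i hi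
      obtain ⟨⟨ha1, ha2, hb1, hb2⟩, hT⟩ := hedge i hi
      refine ⟨⟨by omega, by omega⟩, ⟨⟨by omega, by omega⟩, ?_⟩, hcnt i (by omega)⟩
      unfold pvT
      have e1 : ((((mog.toList.getD i ' ').toNat - 65 : Nat)) : Int)
          = ((mog.toList.getD i ' ').toNat : Int) - 65 := by omega
      have e2 : ((((mog.toList.getD (i+1) ' ').toNat - 65 : Nat)) : Int)
          = ((mog.toList.getD (i+1) ' ').toNat : Int) - 65 := by omega
      rw [e1, e2]
      exact hT
    · exact hcnt (tabel.length - 1) (by omega)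

-- ===== VERDICT (by name: the statement is the Claim_ definition above) =====
theorem is_ketting_spec : Claim_equal_is_ketting := by
  intro mog tabel hdom hpre
  unfold Spec_is_ketting
  exact pv_main mog tabel hdom hpre.1
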